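-- pv_equiv track=rewrite | github.com/yzzc/project | 毕设实验/generateCompleteTree.py | checkLabelSequence
-- ===== SOURCE A (Python) =====
-- def checkLabelSequence(labels):
--     index1 = 0
--     for i in range(1, len(labels)):
--         if labels [index1]!= labels[i]:
--             index1 = i
--             break
--     if index1 == 0:
--         return 0
--
--     index2 = 0
--     for i in range(index1 + 1, len(labels)):
--         if labels [index1]!= labels [i]:
--             index2 = i
--             break
--     if index2 == 0:
--         index2 = len(labels)
--     return index2-index1
-- ===== SOURCE B (Python) =====
-- def checkLabelSequence(labels):
--     # One pass: materialize the run-length structure, then index into it.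
--     runs = []
--     prev = None
--     count = 0
--     for x in labels:
--         if count and x == prev:
--             count += 1
--         else:
--             if count:
--                 runs.append(count)
--             prev, count = x, 1
--     if count:
--         runs.append(count)
--     return runs[1] if len(runs) >= 2 else 0
-- ===== Notes on version B (the rewrite author's own statement) =====
-- stated objective: alternative
-- what changed: B makes one pass materializing the list of run lengths and returns the second entry (0 if fewer than two runs), instead of A's two sentinel-index boundary scans and index subtraction.
import Mathlib
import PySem

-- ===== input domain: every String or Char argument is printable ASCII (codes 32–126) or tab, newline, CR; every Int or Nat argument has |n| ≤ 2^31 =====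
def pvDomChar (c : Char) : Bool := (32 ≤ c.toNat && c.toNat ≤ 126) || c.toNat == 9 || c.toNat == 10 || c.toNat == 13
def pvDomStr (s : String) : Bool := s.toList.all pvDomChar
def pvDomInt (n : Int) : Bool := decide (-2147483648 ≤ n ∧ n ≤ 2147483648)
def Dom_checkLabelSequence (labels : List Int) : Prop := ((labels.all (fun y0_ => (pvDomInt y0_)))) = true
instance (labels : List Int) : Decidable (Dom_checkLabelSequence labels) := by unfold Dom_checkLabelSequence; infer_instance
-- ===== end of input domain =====

-- B materializes the run-length structure in one pass and returns its second entry,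
-- instead of A's two sentinel-index boundary scans; alternative decomposition, same cost.


-- ===== PORT A =====
-- one `for i in range(start, len(labels))` loop with break: returns the break index, 0 if none
def scanBreak (labels : List Int) (idx : Nat) (i : Nat) : Nat :=
  if i < labels.length then
    if labels.getD idx 0 ≠ labels.getD i 0 then i
    else scanBreak labels idx (i + 1)
  else 0
termination_by labels.length - i

def checkLabelSequence (labels : List Int) : Int :=
  let index1 := scanBreak labels 0 1
  if index1 = 0 then 0
  else
    let i2 := scanBreak labels index1 (index1 + 1)
    let index2 := if i2 = 0 then labels.length else i2
    (index2 : Int) - (index1 : Int)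

-- ===== PORT B =====
-- loop body: state is (runs, prev, count); prev = None ↦ none
def stepB (s : List Nat × Option Int × Nat) (x : Int) : List Nat × Option Int × Nat :=
  let (runs, prev, count) := s
  if count ≠ 0 ∧ prev = some x then (runs, prev, count + 1)
  else ((if count ≠ 0 then runs ++ [count] else runs), some x, 1)

def checkLabelSequence_alt (labels : List Int) : Int :=
  let s := labels.foldl stepB ([], none, 0)
  let runs := if s.2.2 ≠ 0 then s.1 ++ [s.2.2] else s.1
  match runs with
  | _ :: r :: _ => (r : Int)
  | _ => 0

-- ===== PRECONDITION & SPEC =====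
def Spec_checkLabelSequence (labels : List Int) (out : Int) : Prop := out = checkLabelSequence_alt labels
instance (labels : List Int) (out : Int) : Decidable (Spec_checkLabelSequence labels out) := by unfold Spec_checkLabelSequence; infer_instance

-- ===== CLAIM (what is proved, stated in full; the proofs are below) =====
def Claim_equal_checkLabelSequence : Prop := ∀ (labels : List Int), Dom_checkLabelSequence labels → Spec_checkLabelSequence labels (checkLabelSequence labels)

-- ===== LEMMAS AND PROOFS =====

-- single elaboration point for the equality predicate used by the run analysis
def eqb (v z : Int) : Bool := z == v

-- reference shape of B's run-length list: pending run of `x` with count `n`, then the rest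
def runsAux (x : Int) (n : Nat) : List Int → List Nat
  | [] => [n]
  | y :: ys => if y = x then runsAux x (n + 1) ys else n :: runsAux y 1 ys

theorem foldB_inv (xs : List Int) : ∀ (runs : List Nat) (v : Int) (c : Nat), c ≠ 0 →
    (if (List.foldl stepB (runs, some v, c) xs).2.2 = 0
     then (List.foldl stepB (runs, some v, c) xs).1
     else (List.foldl stepB (runs, some v, c) xs).1 ++ [(List.foldl stepB (runs, some v, c) xs).2.2])
      = runs ++ runsAux v c xs := by
  induction xs with
  | nil => intro runs v c hc; simp [runsAux, hc]
  | cons x xs ih =>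
    intro runs v c hc
    by_cases hx : x = v
    · subst hx
      have hs : stepB (runs, some x, c) x = (runs, some x, c + 1) := by
        simp [stepB, hc]
      rw [List.foldl_cons, hs, ih runs x (c + 1) (by omega)]
      simp [runsAux]
    · have hs : stepB (runs, some v, c) x = (runs ++ [c], some x, 1) := by
        have hvx : v ≠ x := fun h => hx h.symm
        simp [stepB, hc, hvx]
      rw [List.foldl_cons, hs, ih (runs ++ [c]) x 1 one_ne_zero]
      simp [runsAux, hx]

theorem alt_runs (x : Int) (xs : List Int) :
    checkLabelSequence_alt (x :: xs) =
      (match runsAux x 1 xs with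
       | _ :: r :: _ => (r : Int)
       | _ => 0) := by
  have hs : stepB ([], none, 0) x = ([], some x, 1) := by
    simp [stepB]
  have h := foldB_inv xs [] x 1 one_ne_zero
  simp only [List.nil_append] at h
  simp only [checkLabelSequence_alt, List.foldl_cons, hs, ne_eq, ite_not]
  rw [h]

theorem runsAux_spec (xs : List Int) : ∀ (x : Int) (n : Nat),
    runsAux x n xs =
      (n + (xs.takeWhile (eqb x)).length) ::
        (match xs.dropWhile (eqb x) with
         | [] => []
         | y :: ys => runsAux y 1 ys) := by
  induction xs with
  | nil => intro x n; simp [runsAux]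
  | cons z zs ih =>
    intro x n
    by_cases hz : z = x
    · have hb : eqb x z = true := by simp [eqb, hz]
      rw [List.takeWhile_cons, List.dropWhile_cons, hb]
      subst hz
      simp only [runsAux]
      rw [ih]
      simp
      omega
    · have hb : eqb x z = false := by simp [eqb, hz]
      rw [List.takeWhile_cons, List.dropWhile_cons, hb]
      simp [runsAux, hz]

theorem scanBreak_spec (labels : List Int) (idx : Nat) : ∀ (i : Nat),
    scanBreak labels idx i =
      (if (labels.drop i).dropWhile (eqb (labels.getD idx 0)) = [] then 0
       else i + ((labels.drop i).takeWhile (eqb (labels.getD idx 0))).length) := by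
  intro i
  induction hfi : labels.length - i using Nat.strong_induction_on generalizing i with
  | _ f ih =>
    unfold scanBreak
    by_cases hi : i < labels.length
    · have hdrop : labels.drop i = labels[i] :: labels.drop (i + 1) :=
        List.drop_eq_getElem_cons hi
      have hgd : labels.getD i 0 = labels[i] := List.getD_eq_getElem labels 0 hi
      by_cases hne : labels.getD idx 0 ≠ labels.getD i 0
      · have hb : eqb (labels.getD idx 0) labels[i] = false := by
          rw [← hgd]; simp only [eqb, beq_eq_false_iff_ne, ne_eq]; exact fun h => hne h.symm
        rw [if_pos hi, if_pos hne, hdrop, List.dropWhile_cons, List.takeWhile_cons, hb]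
        simp only [Bool.false_eq_true, if_false]
        rw [if_neg (List.cons_ne_nil _ _)]
        simp
      · rw [not_ne_iff] at hne
        have hb : eqb (labels.getD idx 0) labels[i] = true := by
          rw [← hgd]; simp only [eqb, beq_iff_eq]; exact hne.symm
        rw [if_pos hi, if_neg (fun h => h hne),
          ih (labels.length - (i + 1)) (by omega) (i + 1) rfl,
          hdrop, List.dropWhile_cons, List.takeWhile_cons, hb]
        simp only []
        split_ifs with h
        · rfl
        · simp only [List.length_cons]; omega
    · have hd : labels.drop i = [] := List.drop_eq_nil_of_le (by omega)
      rw [if_neg hi, hd]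
      simp

-- ===== VERDICT (by name: the statement is the Claim_ definition above) =====
theorem checkLabelSequence_spec : Claim_equal_checkLabelSequence := by
  intro labels _
  unfold Spec_checkLabelSequence
  cases labels with
  | nil => simp [checkLabelSequence, checkLabelSequence_alt, scanBreak]
  | cons x xs =>
    rw [alt_runs]
    have h1 := scanBreak_spec (x :: xs) 0 1
    simp only [List.getD_cons_zero, List.drop_succ_cons, List.drop_zero] at h1
    cases hd : xs.dropWhile (eqb x) with
    | nil =>
      rw [hd, if_pos rfl] at h1
      simp only [checkLabelSequence, h1]
      rw [runsAux_spec, hd]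
      simp
    | cons y ys =>
      have hxs : xs.takeWhile (eqb x) ++ y :: ys = xs := by
        rw [← hd]; exact List.takeWhile_append_dropWhile
      set t := xs.takeWhile (eqb x) with ht
      clear_value t
      rw [hd, if_neg (by simp)] at h1
      have hn1 : (1 : Nat) + t.length ≠ 0 := by omega
      have hlen : xs.length = t.length + 1 + ys.length := by
        rw [← hxs]; simp; omega
      have hdropn1 : (x :: xs).drop (1 + t.length) = y :: ys := by
        rw [Nat.add_comm, List.drop_succ_cons, ← hxs, List.drop_left]
      have hgety : (x :: xs).getD (1 + t.length) 0 = y := by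
        rw [List.getD_eq_getElem?_getD, ← List.head?_drop, hdropn1]
        rfl
      have hdrop2 : (x :: xs).drop (1 + t.length + 1) = ys := by
        rw [← List.tail_drop, hdropn1]
        rfl
      have h2 := scanBreak_spec (x :: xs) (1 + t.length) (1 + t.length + 1)
      rw [hgety, hdrop2] at h2
      simp only [checkLabelSequence, h1, if_neg hn1, h2]
      rw [runsAux_spec xs, hd]
      simp only []
      rw [runsAux_spec ys y 1]
      simp only []
      cases hd2 : ys.dropWhile (eqb y) with
      | nil =>
        have ht2 : (ys.takeWhile (eqb y)).length = ys.length := by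
          conv_rhs => rw [← List.takeWhile_append_dropWhile (p := eqb y) (l := ys)]
          rw [hd2]
          simp
        norm_num
        rw [hlen, ht2]
        push_cast
        ring
      | cons z zs =>
        rw [if_neg (List.cons_ne_nil z zs)]
        rw [if_neg (by omega : ¬ (1 + t.length + 1 + (List.takeWhile (eqb y) ys).length = 0))]
        push_cast
        ring
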